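-- pv_equiv track=rewrite | github.com/KobekingLu/ai-pre-shipment-demo | pre_shipment/parser.py | _token_match_score
-- ===== SOURCE A (Python) =====
-- def _token_match_score(left: list[str], right: list[str]) -> int:
--     score = 0
--     for left_token in left:
--         for right_token in right:
--             if left_token == right_token:
--                 score += 3
--             elif left_token in right_token or right_token in left_token:
--                 score += 1
--     return score
-- ===== SOURCE B (Python) =====
-- def _token_match_score(left: list[str], right: list[str]) -> int:
--     # Count equal pairs via a multiplicity map of `right` (one pass), then add
--     # one unconditional containment pass; equal pairs contribute 2 + 1 = 3.
--     counts = {}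
--     for rt in right:
--         counts[rt] = counts.get(rt, 0) + 1
--     eq_pairs = sum(counts.get(lt, 0) for lt in left)
--     sub_pairs = sum(
--         sum(1 for rt in right if lt in rt or rt in lt) for lt in left
--     )
--     return 2 * eq_pairs + sub_pairs
-- ===== Notes on version B (the rewrite author's own statement) =====
-- stated objective: alternative
-- what changed: Replaces the single branching nested pass by a dict-of-multiplicities equality count (2*E) plus a branch-free containment pass (S), using the identity that an equal pair scores 2+1=3 because every string contains itself.
import Mathlib
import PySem

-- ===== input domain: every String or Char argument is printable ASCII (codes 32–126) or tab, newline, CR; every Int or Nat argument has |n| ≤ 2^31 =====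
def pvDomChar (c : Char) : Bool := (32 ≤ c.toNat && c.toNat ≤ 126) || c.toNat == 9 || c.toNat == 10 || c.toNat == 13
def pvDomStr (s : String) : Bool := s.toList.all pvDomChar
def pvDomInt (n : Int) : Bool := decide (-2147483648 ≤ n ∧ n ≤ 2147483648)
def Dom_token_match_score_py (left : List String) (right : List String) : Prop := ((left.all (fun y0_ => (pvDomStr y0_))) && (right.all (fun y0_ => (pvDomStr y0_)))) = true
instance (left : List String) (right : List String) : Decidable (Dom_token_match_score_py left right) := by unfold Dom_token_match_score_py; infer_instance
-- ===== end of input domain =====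

-- B replaces A's single branching nested pass by a dict-of-multiplicities equality
-- count plus a branch-free containment pass (alternative decomposition, same cost).

-- ===== PORT A =====
def token_match_score_py (left : List String) (right : List String) : Int :=
  left.foldl (fun score left_token =>
    right.foldl (fun score right_token =>
      if left_token == right_token then score + 3
      else if PySem.Str.isIn left_token right_token || PySem.Str.isIn right_token left_token then score + 1
      else score) score) 0

-- ===== PORT B =====
def token_match_score_py_alt (left : List String) (right : List String) : Int :=
  let counts := right.foldl (fun d rt => d.insert rt (d.getD rt 0 + 1)) PySem.Dict.empty
  let eqPairs := (left.map (fun lt => counts.getD lt 0)).sum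
  let subPairs := (left.map (fun lt =>
      (right.map (fun rt =>
        if PySem.Str.isIn lt rt || PySem.Str.isIn rt lt then (1 : Int) else 0)).sum)).sum
  2 * eqPairs + subPairs

-- ===== PRECONDITION & SPEC =====
def Spec_token_match_score_py (left : List String) (right : List String) (out : Int) : Prop := out = token_match_score_py_alt left right
instance (left : List String) (right : List String) (out : Int) : Decidable (Spec_token_match_score_py left right out) := by unfold Spec_token_match_score_py; infer_instance

-- ===== CLAIM (what is proved, stated in full; the proofs are below) =====
def Claim_equal_token_match_score_py : Prop := ∀ (left : List String) (right : List String), Dom_token_match_score_py left right → Spec_token_match_score_py left right (token_match_score_py left right)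

-- ===== LEMMAS AND PROOFS =====

-- A string contains itself.
theorem tms_isIn_self (s : String) : PySem.Str.isIn s s = true := by
  simp [PySem.Str.isIn, PySem.Chars.isIn_iff_infix]

-- A's inner loop over `right`: 2 per equal pair plus 1 per containment pair.
theorem tms_inner (lt : String) (right : List String) (s : Int) :
    right.foldl (fun score rt =>
      if lt == rt then score + 3
      else if PySem.Str.isIn lt rt || PySem.Str.isIn rt lt then score + 1
      else score) s
    = 2 * (right.count lt : Int)
        + (right.map (fun rt =>
            if PySem.Str.isIn lt rt || PySem.Str.isIn rt lt then (1 : Int) else 0)).sum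
        + s := by
  induction right generalizing s with
  | nil => simp
  | cons rt rs ih =>
    simp only [List.foldl_cons, List.map_cons, List.sum_cons]
    by_cases h : lt = rt
    · subst h
      rw [if_pos (by simp), ih]
      simp only [tms_isIn_self, Bool.or_self, if_true, List.count_cons_self]
      push_cast
      ring
    · rw [if_neg (by simp [h]), ih]
      have hc : (rt :: rs).count lt = rs.count lt := by
        simp [Ne.symm h]
      rw [hc]
      split_ifs <;> ring

-- pull an additive shift of the accumulator out of A's outer loop
theorem tms_shift (right : List String) :
    ∀ (l : List String) (a b : Int),
      l.foldl (fun score left_token =>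
        right.foldl (fun score rt =>
          if left_token == rt then score + 3
          else if PySem.Str.isIn left_token rt || PySem.Str.isIn rt left_token then score + 1
          else score) score) (a + b)
      = a + l.foldl (fun score left_token =>
          right.foldl (fun score rt =>
            if left_token == rt then score + 3
            else if PySem.Str.isIn left_token rt || PySem.Str.isIn rt left_token then score + 1
            else score) score) b := by
  intro l
  induction l with
  | nil => simp
  | cons x xs ihx =>
    intro a b
    simp only [List.foldl_cons]
    rw [tms_inner, tms_inner]
    have h1 : 2 * ((right.count x : Int))
        + (right.map (fun rt =>
            if PySem.Str.isIn x rt || PySem.Str.isIn rt x then (1 : Int) else 0)).sum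
        + (a + b)
        = a + (2 * ((right.count x : Int))
            + (right.map (fun rt =>
                if PySem.Str.isIn x rt || PySem.Str.isIn rt x then (1 : Int) else 0)).sum
            + b) := by ring
    rw [h1, ihx]

-- A's result in closed summed form.
theorem tms_A_eq (left right : List String) :
    token_match_score_py left right
    = 2 * (left.map (fun lt => (right.count lt : Int))).sum
      + (left.map (fun lt =>
          (right.map (fun rt =>
            if PySem.Str.isIn lt rt || PySem.Str.isIn rt lt then (1 : Int) else 0)).sum)).sum := by
  unfold token_match_score_py
  induction left with
  | nil => simp
  | cons lt ls ih =>
    simp only [List.foldl_cons, List.map_cons, List.sum_cons]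
    rw [tms_inner, tms_shift, ih]
    ring

-- B's dict of multiplicities is Counter(right); its lookup is list count.
theorem tms_counts_getD (right : List String) (lt : String) :
    (right.foldl (fun d rt => d.insert rt (d.getD rt 0 + 1)) PySem.Dict.empty).getD lt 0
    = (right.count lt : Int) := by
  rw [PySem.Dict.foldl_insert_getD_add_one_eq_counter, PySem.Dict.getD_counter]

-- ===== VERDICT (by name: the statement is the Claim_ definition above) =====
theorem token_match_score_py_spec : Claim_equal_token_match_score_py := by
  intro left right _
  unfold Spec_token_match_score_py token_match_score_py_alt
  rw [tms_A_eq]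
  simp only [tms_counts_getD]
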